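-- pv_equiv track=rewrite | github.com/JulianH89/oligo-finder-nf | bin/convert_to_order.py | order_oligo_antisense
-- ===== SOURCE A (Python) =====
-- def order_oligo_antisense(revcomp, antisense_length):
--     """
--     Converts an antisense strand to a synthesis format, applying 2'-Fluoro
--     mods and the tripurine (3rd consecutive A/G) 2'-O-methyl mod.
--
--     Args:
--         revcomp: The reverse-complemented oligonucleotide sequence.
--         antisense_length: The length of the antisense strand to process.
--
--     Returns:
--         The formatted string for synthesis.
--     """
--     antisense = revcomp[1 : 1 + antisense_length]
--     mod_nuc_parts = []
--     purine_flag = 0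
--
--     for i, base in enumerate(antisense):
--         mod_base = base
--         # Tripurine logic applies to the whole sequence
--         if base in ('A', 'G'):
--             purine_flag += 1
--         else:
--             purine_flag = 0
--
--         purine_modulus = purine_flag % 3
--
--         # Apply base modifications
--         if base in ('C', 'U'):
--             mod_base = 'f' + base
--         elif base in ('A', 'G') and purine_flag > 0 and purine_modulus == 0:
--             mod_base = 'm' + base
--
--         # Determine linkage
--         if i < 12:
--             mod_nuc_parts.append(mod_base + ".")
--         elif 12 <= i < 18:
--             mod_nuc_parts.append(mod_base + "#")
--         else: # i >= 18
--             mod_nuc_parts.append(base) # Original Perl code shows no mods here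
--
--     return "PmU." + "".join(mod_nuc_parts)
-- ===== SOURCE B (Python) =====
-- def order_oligo_antisense(revcomp, antisense_length):
--     """Run-length decomposition: mark every 3rd base of each purine run,
--     fluoro the pyrimidines, then assemble the linkages by slicing."""
--     antisense = revcomp[1:1 + antisense_length]
--     mods = []
--     i, n = 0, len(antisense)
--     while i < n:
--         k = antisense[i] in ('A', 'G')
--         j = i
--         while j < n and (antisense[j] in ('A', 'G')) == k:
--             j += 1
--         run = antisense[i:j]
--         if k:
--             mods.extend('m' + b if p % 3 == 2 else b for p, b in enumerate(run))
--         else: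
--             mods.extend('f' + b if b in ('C', 'U') else b for b in run)
--         i = j
--     return ('PmU.'
--             + ''.join(m + '.' for m in mods[:12])
--             + ''.join(m + '#' for m in mods[12:18])
--             + antisense[18:])
-- ===== Notes on version B (the rewrite author's own statement) =====
-- stated objective: alternative
-- what changed: B replaces A's single loop with a threaded purine counter and per-element linkage branching by a run-length decomposition of the sequence into purine/non-purine runs (methylating every 3rd base of each purine run, fluorinating pyrimidines) followed by assembling the '.'/'#'/plain linkages by slicing the modified-base list at positions 12 and 18.
import Mathlib
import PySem

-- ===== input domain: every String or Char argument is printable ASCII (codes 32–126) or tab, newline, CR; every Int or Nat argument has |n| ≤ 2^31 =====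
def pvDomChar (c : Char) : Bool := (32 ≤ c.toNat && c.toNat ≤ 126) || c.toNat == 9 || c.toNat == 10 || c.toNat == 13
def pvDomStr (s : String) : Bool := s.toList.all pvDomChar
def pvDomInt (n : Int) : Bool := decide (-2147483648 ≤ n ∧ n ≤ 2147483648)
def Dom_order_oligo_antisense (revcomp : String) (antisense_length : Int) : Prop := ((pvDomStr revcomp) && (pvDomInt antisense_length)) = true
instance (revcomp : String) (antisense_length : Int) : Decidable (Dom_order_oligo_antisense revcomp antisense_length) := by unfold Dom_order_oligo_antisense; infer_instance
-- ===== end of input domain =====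

-- B recomputes the methyl positions by run-length decomposition of purine runs and
-- assembles the linkages by slicing the modified-base list, instead of A's single
-- loop that threads a running purine counter and decides the linkage per element.
-- Objective: alternative decomposition (same cost).


-- base in ('A', 'G')
def pvIsPurine (b : Char) : Bool := b == 'A' || b == 'G'

-- ===== PORT A =====
-- one iteration of A's loop; state = (purine_flag, parts); element from enumerate
def pvStepA (st : Int × List (List Char)) (ib : Int × Char) : Int × List (List Char) :=
  let purine_flag := if pvIsPurine ib.2 then st.1 + 1 else 0
  let purine_modulus := PySem.Int.mod purine_flag 3
  let mod_base : List Char :=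
    if ib.2 == 'C' || ib.2 == 'U' then ['f', ib.2]
    else if pvIsPurine ib.2 && decide (purine_flag > 0) && (purine_modulus == 0) then ['m', ib.2]
    else [ib.2]
  if ib.1 < 12 then (purine_flag, st.2 ++ [mod_base ++ ['.']])
  else if 12 ≤ ib.1 ∧ ib.1 < 18 then (purine_flag, st.2 ++ [mod_base ++ ['#']])
  else (purine_flag, st.2 ++ [[ib.2]])

def order_oligo_antisense (revcomp : String) (antisense_length : Int) : String :=
  let antisense := PySem.List.slice revcomp.toList (some 1) (some (1 + antisense_length))
  let res := (PySem.List.enumerate antisense 0).foldl pvStepA (0, [])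
  String.ofList ("PmU.".toList ++ res.2.flatten)

-- ===== PORT B =====
-- B's inner while: the maximal run of same purine-kind from the head, then recurse on the rest
def pvRunsB : List Char → List (Bool × List Char)
  | [] => []
  | b :: t =>
    (pvIsPurine b, b :: t.takeWhile (fun x => pvIsPurine x == pvIsPurine b)) ::
      pvRunsB (t.dropWhile (fun x => pvIsPurine x == pvIsPurine b))
termination_by l => l.length
decreasing_by
  have := List.length_dropWhile_le (fun x => pvIsPurine x == pvIsPurine b) t
  simp; omega

def pvModRun (k : Bool) (run : List Char) : List (List Char) :=
  if k then run.mapIdx (fun p b => if p % 3 == 2 then ['m', b] else [b])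
  else run.map (fun b => if b == 'C' || b == 'U' then ['f', b] else [b])

def pvModsB (l : List Char) : List (List Char) :=
  (pvRunsB l).flatMap (fun r => pvModRun r.1 r.2)

def order_oligo_antisense_alt (revcomp : String) (antisense_length : Int) : String :=
  let antisense := PySem.List.slice revcomp.toList (some 1) (some (1 + antisense_length))
  let mods := pvModsB antisense
  String.ofList ("PmU.".toList
    ++ ((mods.take 12).map (· ++ ['.'])).flatten
    ++ (((mods.drop 12).take 6).map (· ++ ['#'])).flatten
    ++ antisense.drop 18)

-- ===== PRECONDITION & SPEC =====
def Spec_order_oligo_antisense (revcomp : String) (antisense_length : Int) (out : String) : Prop := out = order_oligo_antisense_alt revcomp antisense_length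
instance (revcomp : String) (antisense_length : Int) (out : String) : Decidable (Spec_order_oligo_antisense revcomp antisense_length out) := by unfold Spec_order_oligo_antisense; infer_instance

-- ===== CLAIM (what is proved, stated in full; the proofs are below) =====
def Claim_equal_order_oligo_antisense : Prop := ∀ (revcomp : String) (antisense_length : Int), Dom_order_oligo_antisense revcomp antisense_length → Spec_order_oligo_antisense revcomp antisense_length (order_oligo_antisense revcomp antisense_length)

-- ===== LEMMAS AND PROOFS =====

-- A's per-element pieces, as pure functions of the incoming counter
def pvFlag (c : Int) (b : Char) : Int := if pvIsPurine b then c + 1 else 0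

def pvModBase (c : Int) (b : Char) : List Char :=
  if b == 'C' || b == 'U' then ['f', b]
  else if pvIsPurine b && decide (c > 0) && (PySem.Int.mod c 3 == 0) then ['m', b]
  else [b]

def pvPart (i : Int) (m : List Char) (b : Char) : List Char :=
  if i < 12 then m ++ ['.'] else if 12 ≤ i ∧ i < 18 then m ++ ['#'] else [b]

-- the list of modified bases produced from counter c
def pvModList (c : Int) : List Char → List (List Char)
  | [] => []
  | b :: t => pvModBase (pvFlag c b) b :: pvModList (pvFlag c b) t

-- the parts list A accumulates, starting at index i with counter c
def pvPartsList (i c : Int) : List Char → List (List Char)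
  | [] => []
  | b :: t => pvPart i (pvModBase (pvFlag c b) b) b :: pvPartsList (i + 1) (pvFlag c b) t

theorem pvFoldA_eq (l : List Char) : ∀ (i c : Int) (parts : List (List Char)),
    ((PySem.List.enumerate l i).foldl pvStepA (c, parts)).2 = parts ++ pvPartsList i c l := by
  induction l with
  | nil => intro i c parts; simp [PySem.List.enumerate_nil, pvPartsList]
  | cons b t ih =>
    intro i c parts
    rw [PySem.List.enumerate_cons, List.foldl_cons]
    have hstep : pvStepA (c, parts) (i, b)
        = (pvFlag c b, parts ++ [pvPart i (pvModBase (pvFlag c b) b) b]) := by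
      simp only [pvStepA, pvFlag, pvModBase, pvPart]
      by_cases h1 : i < 12 <;> by_cases h2 : 12 ≤ i ∧ i < 18 <;> simp [h1, h2]
    rw [hstep, ih, pvPartsList, List.append_assoc]; rfl

theorem pvModList_length (c : Int) (l : List Char) : (pvModList c l).length = l.length := by
  induction l generalizing c with
  | nil => rfl
  | cons b t ih => simp [pvModList, ih]

-- zip of modified bases with originals, tagging Python index j
def pvZip : Nat → List (List Char) → List Char → List (List Char)
  | _, [], _ => []
  | _, _ :: _, [] => []
  | j, m :: ms, b :: bs => pvPart (j : Int) m b :: pvZip (j + 1) ms bs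

theorem pvPartsList_eq_zip (l : List Char) : ∀ (j : Nat) (c : Int),
    pvPartsList (j : Int) c l = pvZip j (pvModList c l) l := by
  induction l with
  | nil => intro j c; simp [pvPartsList, pvModList, pvZip]
  | cons b t ih =>
    intro j c
    have : ((j : Int) + 1) = ((j + 1 : Nat) : Int) := by push_cast; ring
    rw [pvPartsList, pvModList, pvZip, this, ih]

theorem pvZip_flatten (ms : List (List Char)) : ∀ (bs : List Char) (j : Nat),
    ms.length = bs.length →
    (pvZip j ms bs).flatten
      = ((ms.take (12 - j)).map (· ++ ['.'])).flatten
        ++ (((ms.drop (12 - j)).take ((18 - j) - (12 - j))).map (· ++ ['#'])).flatten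
        ++ bs.drop (18 - j) := by
  induction ms with
  | nil =>
    intro bs j h
    have : bs = [] := List.eq_nil_of_length_eq_zero h.symm
    simp [this, pvZip]
  | cons m ms ih =>
    intro bs j h
    cases bs with
    | nil => simp at h
    | cons b bs =>
      simp only [List.length_cons, Nat.succ.injEq] at h
      rw [pvZip, List.flatten_cons, ih bs (j + 1) h]
      by_cases h1 : j < 12
      · have e1 : 12 - j = (12 - (j + 1)) + 1 := by omega
        have e2 : (18 - j) - (12 - j) = (18 - (j + 1)) - (12 - (j + 1)) := by omega
        have e3 : 18 - j = (18 - (j + 1)) + 1 := by omega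
        rw [e2, e1, e3, List.take_succ_cons, List.drop_succ_cons, List.map_cons,
          List.flatten_cons, List.drop_succ_cons]
        have hp : pvPart (j : Int) m b = m ++ ['.'] := by
          simp [pvPart]; omega
        rw [hp]; simp
      · by_cases h2 : j < 18
        · have e1 : 12 - j = 0 := by omega
          have e1' : 12 - (j + 1) = 0 := by omega
          have e2 : (18 - j) - (12 - j) = ((18 - (j + 1)) - (12 - (j + 1))) + 1 := by omega
          have e3 : 18 - j = (18 - (j + 1)) + 1 := by omega
          rw [e2, e1, e1', e3, List.drop_zero, List.drop_zero, List.take_succ_cons,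
            List.map_cons, List.flatten_cons, List.drop_succ_cons]
          have hp : pvPart (j : Int) m b = m ++ ['#'] := by
            simp only [pvPart]
            rw [if_neg (by omega), if_pos (by constructor <;> omega)]
          rw [hp]; simp
        · have e1 : 12 - j = 0 := by omega
          have e1' : 12 - (j + 1) = 0 := by omega
          have e2 : (18 - j) - (12 - j) = 0 := by omega
          have e2' : (18 - (j + 1)) - (12 - (j + 1)) = 0 := by omega
          have e3 : 18 - j = 0 := by omega
          have e3' : 18 - (j + 1) = 0 := by omega
          rw [e2, e2', e1, e1', e3, e3']
          have hp : pvPart (j : Int) m b = [b] := by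
            simp only [pvPart]
            rw [if_neg (by omega), if_neg (by omega)]
          rw [hp]; simp

-- a non-purine head makes the incoming counter irrelevant
theorem pvModList_reset (c c' : Int) (l : List Char)
    (h : ∀ y ∈ l.head?, pvIsPurine y = false) : pvModList c l = pvModList c' l := by
  cases l with
  | nil => rfl
  | cons y t =>
    have hy : pvIsPurine y = false := h y rfl
    simp [pvModList, pvFlag, hy]

-- a block of non-purines maps to B's fluoro map, counter 0 throughout
theorem pvModList_nonpurine (xs : List Char) (rest : List Char)
    (h : ∀ x ∈ xs, pvIsPurine x = false) :
    pvModList 0 (xs ++ rest)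
      = xs.map (fun b => if b == 'C' || b == 'U' then ['f', b] else [b])
        ++ pvModList 0 rest := by
  induction xs with
  | nil => simp
  | cons x t ih =>
    have hx : pvIsPurine x = false := h x (by simp)
    have hmb : pvModBase 0 x = if x == 'C' || x == 'U' then ['f', x] else [x] := by
      simp [pvModBase, hx]
    simp only [List.cons_append, pvModList, pvFlag, hx, if_false, Bool.false_eq_true, hmb,
      List.map_cons, List.cons_append]
    rw [ih (fun x hx' => h x (by simp [hx']))]

-- a block of purines from counter c maps to the methyl rule at absolute flags c+1, c+2, …
theorem pvModList_purine (xs : List Char) : ∀ (rest : List Char) (c : Nat),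
    (∀ x ∈ xs, pvIsPurine x = true) →
    pvModList (c : Int) (xs ++ rest)
      = xs.mapIdx (fun p b => if (c + p + 1) % 3 == 0 then ['m', b] else [b])
        ++ pvModList ((c : Int) + xs.length) rest := by
  induction xs with
  | nil => intro rest c _; simp
  | cons x t ih =>
    intro rest c h
    have hx : pvIsPurine x = true := h x (by simp)
    have hCU : (x == 'C' || x == 'U') = false := by
      revert hx; simp [pvIsPurine]; rintro (rfl | rfl) <;> decide
    have hmb : pvModBase ((c : Int) + 1) x
        = (if (c + 0 + 1) % 3 == 0 then ['m', x] else [x]) := by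
      simp only [pvModBase, hCU, Bool.false_eq_true, if_false, hx, Bool.true_and]
      have hc : ((c : Int) + 1) = (((c + 1 : Nat)) : Int) := by push_cast; ring
      have hmod : PySem.Int.mod (((c + 1 : Nat)) : Int) 3 = (((c + 1) % 3 : Nat) : Int) := by
        exact_mod_cast PySem.Int.mod_natCast (c + 1) 3
      rw [hc, hmod]
      have hpos : (decide ((((c + 1 : Nat)) : Int) > 0)) = true := by
        rw [decide_eq_true_eq]; exact_mod_cast Nat.succ_pos c
      rw [hpos, Bool.true_and]
      have heq : ((((c + 1) % 3 : Nat) : Int) == 0) = ((c + 0 + 1) % 3 == 0) := by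
        by_cases h3 : (c + 1) % 3 = 0
        · simp [h3]
        · have a1 : ((((c + 1) % 3 : Nat) : Int) == 0) = false := by
            rw [beq_eq_false_iff_ne]; exact_mod_cast h3
          have a2 : ((c + 0 + 1) % 3 == 0) = false := by
            rw [beq_eq_false_iff_ne]; omega
          rw [a1, a2]
      rw [heq]
    have hflag : pvFlag (c : Int) x = (c : Int) + 1 := by simp [pvFlag, hx]
    simp only [List.cons_append, pvModList, hflag, hmb, List.mapIdx_cons]
    have hc1 : ((c : Int) + 1) = (((c + 1 : Nat)) : Int) := by push_cast; ring
    rw [hc1, ih rest (c + 1) (fun x hx' => h x (by simp [hx']))]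
    have hfun : t.mapIdx (fun p b => if ((c + 1 + p + 1) % 3 == 0) = true then (['m', b] : List Char) else [b])
        = t.mapIdx (fun p b => if ((c + (p + 1) + 1) % 3 == 0) = true then ['m', b] else [b]) :=
      List.mapIdx_eq_mapIdx_iff.mpr (fun i _ => by rw [show c + 1 + i + 1 = c + (i + 1) + 1 from by omega])
    have hcnt : (((c + 1 : Nat)) : Int) + (t.length : Int) = (c : Int) + ((t.length : Int) + 1) := by
      push_cast; ring
    rw [hfun, hcnt]
    simp

theorem pvModsB_eq (n : Nat) : ∀ (l : List Char), l.length ≤ n → pvModsB l = pvModList 0 l := by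
  induction n with
  | zero =>
    intro l h
    have : l = [] := List.eq_nil_of_length_eq_zero (Nat.le_zero.1 h)
    simp [this, pvModsB, pvRunsB, pvModList]
  | succ n ih =>
    intro l h
    cases l with
    | nil => simp [pvModsB, pvRunsB, pvModList]
    | cons b t =>
      set p := fun x => pvIsPurine x == pvIsPurine b with hp
      have hsplit : t.takeWhile p ++ t.dropWhile p = t := List.takeWhile_append_dropWhile
      have hrest : (t.dropWhile p).length ≤ n := by
        have := List.length_dropWhile_le p t
        simp only [List.length_cons] at h; omega
      have hihr := ih (t.dropWhile p) hrest
      rw [pvModsB, pvRunsB, List.flatMap_cons, ← pvModsB, hihr]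
      by_cases hb : pvIsPurine b = true
      · -- purine run
        have hrun : ∀ x ∈ b :: t.takeWhile p, pvIsPurine x = true := by
          intro x hx
          rcases List.mem_cons.1 hx with rfl | hx'
          · exact hb
          · have := List.mem_takeWhile_imp hx'
            simp only [hp, hb] at this; simpa using this
        have hhead : ∀ y ∈ (t.dropWhile p).head?, pvIsPurine y = false := by
          intro y hy
          cases hd : t.dropWhile p with
          | nil => simp [hd] at hy
          | cons z zs =>
            simp only [hd, List.head?_cons, Option.mem_def, Option.some.injEq] at hy
            subst hy
            have hne : t.dropWhile p ≠ [] := by simp [hd]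
            have h1 := List.head_dropWhile_not p (l := t) hne
            have h2 : (t.dropWhile p).head hne = z := by simp [hd]
            rw [h2] at h1
            simp only [hp, hb, beq_true] at h1
            exact h1
        have hA : pvModList 0 (b :: t) = pvModList (0 : Int) ((b :: t.takeWhile p) ++ t.dropWhile p) := by
          rw [List.cons_append, hsplit]
        have h0 : ((0 : Nat) : Int) = (0 : Int) := by norm_num
        rw [hA, ← h0, pvModList_purine (b :: t.takeWhile p) (t.dropWhile p) 0 hrun]
        congr 1
        · simp only [pvModRun, hb, if_pos, hp, beq_true]
          apply List.mapIdx_eq_mapIdx_iff.mpr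
          intro i hi
          by_cases hm : i % 3 = 2
          · rw [show (0 + i + 1) % 3 = 0 from by omega, hm]; rfl
          · have a1 : ((0 + i + 1) % 3 == 0) = false := by
              rw [beq_eq_false_iff_ne]; omega
            have a2 : (i % 3 == 2) = false := by
              rw [beq_eq_false_iff_ne]; omega
            rw [a1, a2]
        · exact pvModList_reset 0 _ _ hhead
      · -- non-purine run
        have hb' : pvIsPurine b = false := by simpa using hb
        have hrun : ∀ x ∈ b :: t.takeWhile p, pvIsPurine x = false := by
          intro x hx
          rcases List.mem_cons.1 hx with rfl | hx'
          · exact hb'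
          · have := List.mem_takeWhile_imp hx'
            simp only [hp, hb'] at this; simpa using this
        have hA : pvModList 0 (b :: t) = pvModList 0 ((b :: t.takeWhile p) ++ t.dropWhile p) := by
          rw [List.cons_append, hsplit]
        rw [hA, pvModList_nonpurine (b :: t.takeWhile p) (t.dropWhile p) hrun]
        congr 1
        simp [pvModRun, hb', hp]

-- ===== VERDICT (by name: the statement is the Claim_ definition above) =====
theorem order_oligo_antisense_spec : Claim_equal_order_oligo_antisense := by
  intro revcomp antisense_length _
  unfold Spec_order_oligo_antisense order_oligo_antisense order_oligo_antisense_alt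
  dsimp only
  set cs := PySem.List.slice revcomp.toList (some 1) (some (1 + antisense_length)) with hcs
  have hmods : pvModsB cs = pvModList 0 cs := pvModsB_eq cs.length cs le_rfl
  have hfold := pvFoldA_eq cs 0 0 []
  have hlen : (pvModList 0 cs).length = cs.length := pvModList_length 0 cs
  have hzip := pvZip_flatten (pvModList 0 cs) cs 0 hlen
  simp only [List.nil_append] at hfold
  congr 1
  rw [hfold]
  rw [show pvPartsList 0 0 cs = pvPartsList ((0 : Nat) : Int) 0 cs from by norm_num,
    pvPartsList_eq_zip cs 0 0, hzip, hmods]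
  simp
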